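-- pv_equiv track=rewrite | github.com/Goslawq/crypto | BBS.py | series_test_engine
-- ===== SOURCE A (Python) =====
-- def series_test_engine(string):
--     counter = 0
--     s1, s2, s3, s4, s5, s6 = 0, 0, 0, 0, 0, 0
--     for i in range(len(string)):
--         if string[i] == "0":
--             counter += 1
--         else:
--
--             if counter == 1:
--                 s1 += 1
--             elif counter == 2:
--                 s2 += 1
--             elif counter == 3:
--                 s3 += 1
--             elif counter == 4:
--                 s4 += 1
--             elif counter == 5:
--                 s5 += 1
--             elif counter > 5:
--                 s6 += 1
--             counter = 0
--
--     return s1, s2, s3, s4, s5, s6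
-- ===== SOURCE B (Python) =====
-- def series_test_engine(string):
--     # collect-then-tally: strip the (never-counted) trailing zero run, turn every
--     # non-'0' char into a space, split into the terminated zero-runs, then bucket.
--     trimmed = string.rstrip('0')
--     masked = ''.join(c if c == '0' else ' ' for c in trimmed)
--     buckets = [0] * 7
--     for run in masked.split():
--         buckets[min(len(run), 6)] += 1
--     return tuple(buckets[1:])
-- ===== Notes on version B (the rewrite author's own statement) =====
-- stated objective: idiomatic
-- what changed: A's single-pass counter state machine with an interleaved six-way if/elif chain is replaced by a collect-then-tally decomposition: strip the never-counted trailing zero run, mask every non-zero character to a space, split the masked string into the terminated zero runs, and bucket each run length via min(len, 6) into a counts table.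
import Mathlib
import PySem

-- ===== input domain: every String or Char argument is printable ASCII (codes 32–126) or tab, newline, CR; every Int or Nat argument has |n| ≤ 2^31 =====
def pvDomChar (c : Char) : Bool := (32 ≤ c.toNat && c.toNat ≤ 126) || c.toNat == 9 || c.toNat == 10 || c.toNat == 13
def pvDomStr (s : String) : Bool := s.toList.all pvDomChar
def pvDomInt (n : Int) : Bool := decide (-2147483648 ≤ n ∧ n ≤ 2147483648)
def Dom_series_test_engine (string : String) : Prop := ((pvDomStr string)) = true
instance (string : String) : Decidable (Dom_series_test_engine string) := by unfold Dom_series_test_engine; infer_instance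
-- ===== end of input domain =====

-- B replaces A's interleaved counter state machine by a collect-then-tally decomposition
-- (strip the trailing zero run, mask non-'0' chars to spaces, split into runs, bucket the lengths);
-- objective: idiomatic decomposition, same O(n) cost.

-- ===== PORT A =====
-- the loop body of A, as a step function over the state (counter, s1, s2, s3, s4, s5, s6)
def pvStepA (st : Int × Int × Int × Int × Int × Int × Int) (c : Char) :
    Int × Int × Int × Int × Int × Int × Int :=
  let (counter, s1, s2, s3, s4, s5, s6) := st
  if c == '0' then (counter + 1, s1, s2, s3, s4, s5, s6)
  else
    if counter == 1 then (0, s1 + 1, s2, s3, s4, s5, s6)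
    else if counter == 2 then (0, s1, s2 + 1, s3, s4, s5, s6)
    else if counter == 3 then (0, s1, s2, s3 + 1, s4, s5, s6)
    else if counter == 4 then (0, s1, s2, s3, s4 + 1, s5, s6)
    else if counter == 5 then (0, s1, s2, s3, s4, s5 + 1, s6)
    else if 5 < counter then (0, s1, s2, s3, s4, s5, s6 + 1)
    else (0, s1, s2, s3, s4, s5, s6)

def series_test_engine (string : String) : Int × Int × Int × Int × Int × Int :=
  -- for i in range(len(string)): string[i] visits the characters in order = fold over the char list
  (string.toList.foldl pvStepA (0, 0, 0, 0, 0, 0, 0)).2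

-- ===== PORT B =====
-- hand port of string.rstrip('0') for the single-char strip set: drop exactly the trailing '0's (exact)
def pvRstrip0 (cs : List Char) : List Char :=
  (cs.reverse.dropWhile (fun c => c == '0')).reverse

def series_test_engine_alt (string : String) : Int × Int × Int × Int × Int × Int :=
  let trimmed := pvRstrip0 string.toList
  -- ''.join(c if c == '0' else ' ' for c in trimmed) is a per-character map (exact)
  let masked := trimmed.map (fun c => if c == '0' then c else ' ')
  let buckets : List Int := List.replicate 7 0
  -- buckets[min(len(run), 6)] += 1 ; the index is 0..6, always in range of the 7-element list
  let buckets := (PySem.Chars.split₀ masked).foldl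
    (fun (b : List Int) run => b.set (min run.length 6) (b.getD (min run.length 6) 0 + 1))
    buckets
  (buckets.getD 1 0, buckets.getD 2 0, buckets.getD 3 0,
   buckets.getD 4 0, buckets.getD 5 0, buckets.getD 6 0)

-- ===== PRECONDITION & SPEC =====
def Spec_series_test_engine (string : String) (out : Int × Int × Int × Int × Int × Int) : Prop := out = series_test_engine_alt string
instance (string : String) (out : Int × Int × Int × Int × Int × Int) : Decidable (Spec_series_test_engine string out) := by unfold Spec_series_test_engine; infer_instance

-- ===== CLAIM (what is proved, stated in full; the proofs are below) =====
def Claim_equal_series_test_engine : Prop := ∀ (string : String), Dom_series_test_engine string → Spec_series_test_engine string (series_test_engine string)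

-- ===== LEMMAS AND PROOFS =====

-- the bucket increment contributed by one terminated run of length n (as A's if-chain writes it)
def pvDelta (n : Int) : Int × Int × Int × Int × Int × Int :=
  if n == 1 then (1, 0, 0, 0, 0, 0)
  else if n == 2 then (0, 1, 0, 0, 0, 0)
  else if n == 3 then (0, 0, 1, 0, 0, 0)
  else if n == 4 then (0, 0, 0, 1, 0, 0)
  else if n == 5 then (0, 0, 0, 0, 1, 0)
  else if 5 < n then (0, 0, 0, 0, 0, 1)
  else (0, 0, 0, 0, 0, 0)

def pvTally (l : List Nat) : Int × Int × Int × Int × Int × Int :=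
  l.foldr (fun k t => pvDelta (k : Int) + t) (0, 0, 0, 0, 0, 0)

-- terminated zero-run lengths of cs, scanning with a pending run of length n; trailing run dropped
def pvGo (cs : List Char) (n : Nat) : List Nat :=
  match cs with
  | [] => []
  | c :: r => if c == '0' then pvGo r (n + 1) else (if n == 0 then [] else [n]) ++ pvGo r 0

-- same, but the trailing run is kept
def pvGo' (cs : List Char) (n : Nat) : List Nat :=
  match cs with
  | [] => if n == 0 then [] else [n]
  | c :: r => if c == '0' then pvGo' r (n + 1) else (if n == 0 then [] else [n]) ++ pvGo' r 0

theorem pvGo_cons (c : Char) (r : List Char) (n : Nat) :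
    pvGo (c :: r) n = if c == '0' then pvGo r (n + 1)
      else (if n == 0 then [] else [n]) ++ pvGo r 0 := rfl

theorem pvGo'_cons (c : Char) (r : List Char) (n : Nat) :
    pvGo' (c :: r) n = if c == '0' then pvGo' r (n + 1)
      else (if n == 0 then [] else [n]) ++ pvGo' r 0 := rfl

theorem pvTally_cons (k : Nat) (l : List Nat) :
    pvTally (k :: l) = pvDelta (k : Int) + pvTally l := rfl

theorem pvTally_nil : pvTally [] = (0, 0, 0, 0, 0, 0) := rfl

theorem pvZero_add (x : Int × Int × Int × Int × Int × Int) :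
    ((0, 0, 0, 0, 0, 0) : Int × Int × Int × Int × Int × Int) + x = x := by
  obtain ⟨a, b, c, d, e, f⟩ := x
  simp

theorem pvAdd_zero (x : Int × Int × Int × Int × Int × Int) :
    x + ((0, 0, 0, 0, 0, 0) : Int × Int × Int × Int × Int × Int) = x := by
  obtain ⟨a, b, c, d, e, f⟩ := x
  simp

-- A's loop computes the tally of pvGo
theorem pvFoldA_spec (cs : List Char) (n : Nat) (s : Int × Int × Int × Int × Int × Int) :
    (cs.foldl pvStepA ((n : Int), s)).2 = s + pvTally (pvGo cs n) := by
  induction cs generalizing n s with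
  | nil => simp [pvGo, pvTally_nil, pvAdd_zero]
  | cons c r ih =>
    by_cases h : c = '0'
    · subst h
      have : pvStepA ((n : Int), s) '0' = (((n + 1 : Nat) : Int), s) := by
        obtain ⟨a, b, c, d, e, f⟩ := s
        simp [pvStepA]
      rw [List.foldl_cons, this, ih]
      simp [pvGo]
    · have hst : pvStepA ((n : Int), s) c = (((0 : Nat) : Int), s + pvDelta (n : Int)) := by
        obtain ⟨a, b, cc, d, e, f⟩ := s
        simp only [pvStepA, pvDelta]
        rw [if_neg (by simp [h])]
        split_ifs <;> simp
      have hgo : pvGo (c :: r) n = (if n == 0 then [] else [n]) ++ pvGo r 0 := by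
        simp [pvGo, h]
      rw [List.foldl_cons, hst, ih, hgo]
      by_cases hn : n = 0
      · subst hn
        simp [pvDelta, pvAdd_zero]
      · rw [if_neg (by simpa using hn)]
        simp [pvTally_cons, add_assoc]

-- appending a trailing '0' changes only the counter, not the result part
theorem pvFoldA_append_zero (cs : List Char) (st : Int × Int × Int × Int × Int × Int × Int) :
    ((cs ++ ['0']).foldl pvStepA st).2 = (cs.foldl pvStepA st).2 := by
  rw [List.foldl_append]
  obtain ⟨cnt, a, b, c, d, e, f⟩ := cs.foldl pvStepA st
  simp [pvStepA]

theorem pvRstrip0_append_zero (cs : List Char) :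
    pvRstrip0 (cs ++ ['0']) = pvRstrip0 cs := by
  simp [pvRstrip0]

theorem pvRstrip0_append_ne (cs : List Char) (c : Char) (h : c ≠ '0') :
    pvRstrip0 (cs ++ [c]) = cs ++ [c] := by
  simp [pvRstrip0, h]

-- stripping the trailing zeros does not change A's result
theorem pvFoldA_rstrip (cs : List Char) (st : Int × Int × Int × Int × Int × Int × Int) :
    (cs.foldl pvStepA st).2 = ((pvRstrip0 cs).foldl pvStepA st).2 := by
  induction cs using List.reverseRecOn with
  | nil => simp [pvRstrip0]
  | append_singleton ds c ih =>
    by_cases h : c = '0'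
    · subst h
      rw [pvRstrip0_append_zero, pvFoldA_append_zero, ih]
    · rw [pvRstrip0_append_ne ds c h]

theorem pvHead?_dropWhile (p : Char → Bool) (l : List Char) (c : Char) (hc : p c = true) :
    (l.dropWhile p).head? ≠ some c := by
  induction l with
  | nil => simp
  | cons a r ih =>
    by_cases h : p a
    · simpa [List.dropWhile, h] using ih
    · simp only [List.dropWhile, h]
      intro hcon
      simp at hcon
      subst hcon
      simp [hc] at h

theorem pvRstrip0_noTrail (cs : List Char) :
    (pvRstrip0 cs).getLast? ≠ some '0' := by
  unfold pvRstrip0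
  rw [List.getLast?_reverse]
  exact pvHead?_dropWhile _ _ _ (by decide)

-- when there is no trailing zero run, keeping it or dropping it is the same
theorem pvGo_eq_go' (t : List Char) (n : Nat) (h0 : t = [] → n = 0)
    (h1 : t.getLast? ≠ some '0') : pvGo t n = pvGo' t n := by
  induction t generalizing n with
  | nil => simp [pvGo, pvGo', h0 rfl]
  | cons c r ih =>
    rcases r with _ | ⟨d, r'⟩
    · have hc : c ≠ '0' := by simpa using h1
      simp [pvGo, pvGo', hc]
    · have hlast : (d :: r').getLast? ≠ some '0' := by
        simpa [List.getLast?_cons_cons] using h1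
      by_cases hc : c = '0'
      · subst hc
        exact ih (n + 1) (by simp) hlast
      · have hbc : (c == '0') = false := by simp [hc]
        rw [pvGo_cons, pvGo'_cons]
        simp only [hbc, Bool.false_eq_true, if_false]
        rw [ih 0 (by simp) hlast]

-- the word lengths produced by split₀ on the masked string are exactly pvGo'
theorem pvSplit_go_spec (t : List Char) (cur : List Char) (acc : List (List Char)) :
    (PySem.Chars.split₀.go (t.map (fun c => if c == '0' then c else ' ')) cur acc).map
        List.length
      = acc.reverse.map List.length ++ pvGo' t cur.length := by
  induction t generalizing cur acc with
  | nil =>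
    by_cases h : cur = []
    · subst h
      simp [PySem.Chars.split₀.go, pvGo']
    · rw [show (([] : List Char).map (fun c => if c == '0' then c else ' ')) = [] from rfl]
      unfold PySem.Chars.split₀.go
      rw [if_neg (by simpa using h)]
      simp [pvGo', h]
  | cons c r ih =>
    by_cases hc : c = '0'
    · subst hc
      have : (('0' :: r).map (fun c => if c == '0' then c else ' '))
          = '0' :: r.map (fun c => if c == '0' then c else ' ') := by simp
      rw [this]
      unfold PySem.Chars.split₀.go
      rw [if_neg (by decide)]
      rw [ih ('0' :: cur) acc]
      simp [pvGo']
    · have hm : ((c :: r).map (fun c => if c == '0' then c else ' '))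
          = ' ' :: r.map (fun c => if c == '0' then c else ' ') := by simp [hc]
      rw [hm]
      unfold PySem.Chars.split₀.go
      rw [if_pos (by decide)]
      by_cases h : cur = []
      · subst h
        rw [if_pos (by simp)]
        rw [ih [] acc]
        simp [pvGo', hc]
      · rw [if_neg (by simpa using h)]
        rw [ih [] (cur.reverse :: acc)]
        simp [pvGo', hc, h]

-- one bucket increment equals adding pvDelta
theorem pvBucket_step (b : List Int) (hb : b.length = 7) (k : Nat) :
    ((b.set (min k 6) (b.getD (min k 6) 0 + 1)).getD 1 0,
     (b.set (min k 6) (b.getD (min k 6) 0 + 1)).getD 2 0,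
     (b.set (min k 6) (b.getD (min k 6) 0 + 1)).getD 3 0,
     (b.set (min k 6) (b.getD (min k 6) 0 + 1)).getD 4 0,
     (b.set (min k 6) (b.getD (min k 6) 0 + 1)).getD 5 0,
     (b.set (min k 6) (b.getD (min k 6) 0 + 1)).getD 6 0)
      = (b.getD 1 0, b.getD 2 0, b.getD 3 0, b.getD 4 0, b.getD 5 0, b.getD 6 0)
          + pvDelta (k : Int) := by
  match b, hb with
  | [a0, a1, a2, a3, a4, a5, a6], _ =>
    match k with
    | 0 => simp [pvDelta]
    | 1 => simp [pvDelta]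
    | 2 => simp [pvDelta]
    | 3 => simp [pvDelta]
    | 4 => simp [pvDelta]
    | 5 => simp [pvDelta]
    | (m + 6) =>
      have h6 : min (m + 6) 6 = 6 := by omega
      rw [h6, pvDelta]
      rw [if_neg (by simp; omega), if_neg (by simp; omega), if_neg (by simp; omega),
        if_neg (by simp; omega), if_neg (by simp; omega), if_pos (by push_cast; omega)]
      simp

-- the bucket loop computes the tally of the word lengths
theorem pvBucket_fold (runs : List (List Char)) (b : List Int) (hb : b.length = 7) :
    (((runs.foldl (fun (b : List Int) run =>
          b.set (min run.length 6) (b.getD (min run.length 6) 0 + 1)) b).getD 1 0,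
      (runs.foldl (fun (b : List Int) run =>
          b.set (min run.length 6) (b.getD (min run.length 6) 0 + 1)) b).getD 2 0,
      (runs.foldl (fun (b : List Int) run =>
          b.set (min run.length 6) (b.getD (min run.length 6) 0 + 1)) b).getD 3 0,
      (runs.foldl (fun (b : List Int) run =>
          b.set (min run.length 6) (b.getD (min run.length 6) 0 + 1)) b).getD 4 0,
      (runs.foldl (fun (b : List Int) run =>
          b.set (min run.length 6) (b.getD (min run.length 6) 0 + 1)) b).getD 5 0,
      (runs.foldl (fun (b : List Int) run =>
          b.set (min run.length 6) (b.getD (min run.length 6) 0 + 1)) b).getD 6 0))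
      = (b.getD 1 0, b.getD 2 0, b.getD 3 0, b.getD 4 0, b.getD 5 0, b.getD 6 0)
          + pvTally (runs.map List.length) := by
  induction runs generalizing b with
  | nil => simp [pvTally_nil]
  | cons r l ih =>
    simp only [List.foldl_cons, List.map_cons, pvTally_cons]
    rw [ih _ (by simp [hb]), pvBucket_step b hb r.length, add_assoc]

-- ===== VERDICT (by name: the statement is the Claim_ definition above) =====
theorem series_test_engine_spec : Claim_equal_series_test_engine := by
  intro string _
  unfold Spec_series_test_engine series_test_engine series_test_engine_alt
  set cs := string.toList with hcs
  rw [pvFoldA_rstrip]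
  have h0 : ((0 : Int), ((0 : Int), (0 : Int), (0 : Int), (0 : Int), (0 : Int), (0 : Int)))
      = (((0 : Nat) : Int), ((0 : Int), (0 : Int), (0 : Int), (0 : Int), (0 : Int), (0 : Int))) := by
    simp
  rw [h0, pvFoldA_spec, pvZero_add]
  rw [pvGo_eq_go' (pvRstrip0 cs) 0 (fun _ => rfl) (pvRstrip0_noTrail cs)]
  have hsplit := pvSplit_go_spec (pvRstrip0 cs) [] []
  have hruns : (PySem.Chars.split₀
      ((pvRstrip0 cs).map (fun c => if c == '0' then c else ' '))).map List.length
      = pvGo' (pvRstrip0 cs) 0 := by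
    simpa [PySem.Chars.split₀] using hsplit
  rw [pvBucket_fold _ _ (by simp), ← hruns]
  simp [pvZero_add]
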